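-- pv_equiv track=rewrite | github.com/Nosuchperson-z/dcdetector-evaluation-pipeline | scripts/eval/unified_evaluator.py | merge_close_events
-- ===== SOURCE A (Python) =====
-- def merge_close_events(events: list[tuple[int, int]], gap_size: int) -> list[tuple[int, int]]:
--     if not events or gap_size <= 0:
--         return list(events)
--     merged = [events[0]]
--     for start, end in events[1:]:
--         prev_start, prev_end = merged[-1]
--         if start - prev_end - 1 <= gap_size:
--             merged[-1] = (prev_start, end)
--         else:
--             merged.append((start, end))
--     return merged
-- ===== SOURCE B (Python) =====
-- def merge_close_events(events: list[tuple[int, int]], gap_size: int) -> list[tuple[int, int]]: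
--     if not events or gap_size <= 0:
--         return list(events)
--     # pass 1: cut the sequence into groups wherever the gap to the previous event is too large
--     groups = []
--     current = [events[0]]
--     for prev, cur in zip(events, events[1:]):
--         if cur[0] - prev[1] - 1 > gap_size:
--             groups.append(current)
--             current = [cur]
--         else:
--             current.append(cur)
--     groups.append(current)
--     # pass 2: collapse each group to (first start, last end)
--     return [(g[0][0], g[-1][1]) for g in groups]
-- ===== Notes on version B (the rewrite author's own statement) =====
-- stated objective: alternative
-- what changed: Replaced the single accumulator loop that rewrites the last merged tuple in place by a two-pass decomposition: one pass cuts the events into groups at gaps larger than gap_size, a second pass maps each group to (first start, last end).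
import Mathlib
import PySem

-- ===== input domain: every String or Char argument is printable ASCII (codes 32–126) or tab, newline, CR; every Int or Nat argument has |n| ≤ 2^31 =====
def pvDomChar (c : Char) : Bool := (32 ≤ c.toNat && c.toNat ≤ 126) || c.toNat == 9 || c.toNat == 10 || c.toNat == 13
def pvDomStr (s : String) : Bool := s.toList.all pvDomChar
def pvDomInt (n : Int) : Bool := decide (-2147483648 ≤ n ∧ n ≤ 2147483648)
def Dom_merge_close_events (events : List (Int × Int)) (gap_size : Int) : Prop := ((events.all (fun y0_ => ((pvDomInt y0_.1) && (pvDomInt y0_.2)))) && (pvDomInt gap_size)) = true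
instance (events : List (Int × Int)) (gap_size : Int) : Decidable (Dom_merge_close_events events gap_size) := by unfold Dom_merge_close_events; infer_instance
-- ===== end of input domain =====

-- B replaces A's last-element-rewriting accumulator loop by a two-pass decomposition
-- (cut into groups at large gaps, then collapse each group); same cost, alternative structure.

-- ===== PORT A =====
-- A's loop; `merged` is kept reversed (cons = Python's access/update of merged[-1] / append).
def mceLoopA (g : Int) : List (Int × Int) → List (Int × Int) → List (Int × Int)
  | acc, [] => acc.reverse
  | acc, (s, e) :: rest =>
    match acc with
    | (ps, pe) :: accTl =>
      if s - pe - 1 ≤ g then mceLoopA g ((ps, e) :: accTl) rest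
      else mceLoopA g ((s, e) :: (ps, pe) :: accTl) rest
    | [] => []   -- unreachable: merged starts non-empty and never shrinks

def merge_close_events (events : List (Int × Int)) (gap_size : Int) : List (Int × Int) :=
  if events = [] ∨ gap_size ≤ 0 then events
  else
    match events with
    | [] => []
    | e :: rest => mceLoopA gap_size [e] rest

-- ===== PORT B =====
-- pass 1 of Source B: split into groups; `p` is the previous event (zip(events, events[1:])).
def mceSplit (g : Int) (p : Int × Int) : List (Int × Int) → List (List (Int × Int))
  | [] => [[p]]
  | q :: rs =>
    if q.1 - p.2 - 1 > g then [p] :: mceSplit g q rs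
    else
      match mceSplit g q rs with
      | [] => [[p]]          -- unreachable: mceSplit never returns []
      | gr :: grs => (p :: gr) :: grs

-- pass 2 of Source B: (g[0][0], g[-1][1]) for a (non-empty) group
def mceCollapse (gr : List (Int × Int)) : Int × Int :=
  ((gr.headD (0, 0)).1, (gr.getLastD (0, 0)).2)

def merge_close_events_alt (events : List (Int × Int)) (gap_size : Int) : List (Int × Int) :=
  if events = [] ∨ gap_size ≤ 0 then events
  else
    match events with
    | [] => []
    | e :: rest => (mceSplit gap_size e rest).map mceCollapse

-- ===== PRECONDITION & SPEC =====
def Spec_merge_close_events (events : List (Int × Int)) (gap_size : Int) (out : List (Int × Int)) : Prop := out = merge_close_events_alt events gap_size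
instance (events : List (Int × Int)) (gap_size : Int) (out : List (Int × Int)) : Decidable (Spec_merge_close_events events gap_size out) := by unfold Spec_merge_close_events; infer_instance

-- ===== CLAIM (what is proved, stated in full; the proofs are below) =====
def Claim_equal_merge_close_events : Prop := ∀ (events : List (Int × Int)) (gap_size : Int), Dom_merge_close_events events gap_size → Spec_merge_close_events events gap_size (merge_close_events events gap_size)

-- ===== LEMMAS AND PROOFS =====

-- proof-side intermediary: the straightforward recursion both programs compute
def mceMg (g : Int) (p : Int × Int) : List (Int × Int) → List (Int × Int)
  | [] => [p]
  | (s, e) :: rest => if s - p.2 - 1 ≤ g then mceMg g (p.1, e) rest else p :: mceMg g (s, e) rest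

theorem mceLoopA_eq_mg (g : Int) (rest : List (Int × Int)) :
    ∀ (p : Int × Int) (acc : List (Int × Int)),
      mceLoopA g (p :: acc) rest = acc.reverse ++ mceMg g p rest := by
  induction rest with
  | nil => intro p acc; simp [mceLoopA, mceMg]
  | cons qe rs ih =>
    rintro ⟨ps, pe⟩ acc
    obtain ⟨s, e⟩ := qe
    by_cases h : s - pe - 1 ≤ g
    · simp [mceLoopA, mceMg, h, ih]
    · simp [mceLoopA, mceMg, h, ih]

theorem mceSplit_cong (g : Int) (rs : List (Int × Int)) :
    ∀ (a b pe : Int), ∃ gr t, mceSplit g (a, pe) rs = ((a, pe) :: gr) :: t ∧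
      mceSplit g (b, pe) rs = ((b, pe) :: gr) :: t := by
  induction rs with
  | nil => intro a b pe; exact ⟨[], [], rfl, rfl⟩
  | cons q rs ih =>
    intro a b pe
    by_cases h : q.1 - pe - 1 > g
    · exact ⟨[], mceSplit g q rs, by simp [mceSplit, h], by simp [mceSplit, h]⟩
    · obtain ⟨gr, t, h1, h2⟩ := ih q.1 q.1 q.2
      refine ⟨q :: gr, t, ?_, ?_⟩ <;> simp [mceSplit, h, h1]

theorem mceSplit_collapse_eq_mg (g : Int) (rest : List (Int × Int)) :
    ∀ (p : Int × Int), (mceSplit g p rest).map mceCollapse = mceMg g p rest := by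
  induction rest with
  | nil => intro p; simp [mceSplit, mceMg, mceCollapse]
  | cons q rs ih =>
    intro p
    obtain ⟨s, e⟩ := q
    by_cases h : s - p.2 - 1 > g
    · have h' : ¬ (s - p.2 - 1 ≤ g) := by omega
      simp only [mceSplit, mceMg, h, h', if_true, if_false, List.map_cons, ih]
      simp [mceCollapse]
    · have h' : s - p.2 - 1 ≤ g := by omega
      obtain ⟨gr, t, h1, h2⟩ := mceSplit_cong g rs p.1 s e
      have ihp := ih (p.1, e)
      rw [h1, List.map_cons] at ihp
      simp only [mceSplit, mceMg, h, h', if_true, if_false, h2, List.map_cons]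
      have hc : mceCollapse (p :: (s, e) :: gr) = mceCollapse ((p.1, e) :: gr) := by
        cases gr <;> simp [mceCollapse]
      rw [hc]
      exact ihp

theorem merge_close_events_spec_aux (events : List (Int × Int)) (gap_size : Int) :
    merge_close_events events gap_size = merge_close_events_alt events gap_size := by
  unfold merge_close_events merge_close_events_alt
  by_cases h : events = [] ∨ gap_size ≤ 0
  · simp [h]
  · simp only [h, if_false]
    cases events with
    | nil => rfl
    | cons e rest =>
      show mceLoopA gap_size [e] rest = (mceSplit gap_size e rest).map mceCollapse
      rw [mceSplit_collapse_eq_mg]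
      simpa using mceLoopA_eq_mg gap_size rest e []

-- ===== VERDICT (by name: the statement is the Claim_ definition above) =====
theorem merge_close_events_spec : Claim_equal_merge_close_events := by
  intro events gap_size _
  exact merge_close_events_spec_aux events gap_size
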